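-- pv_equiv track=rewrite | github.com/DEMONSLAYER66/Overseer | cogs/fun.py | get_price_term
-- ===== SOURCE A (Python) =====
-- def get_price_term(price_terms, price):
--     sorted_terms = sorted(price_terms.keys())
--     for i in range(len(sorted_terms) - 1):
--         lower_bound = sorted_terms[i]
--         upper_bound = sorted_terms[i + 1]
--         if lower_bound <= price <= upper_bound:
--             return f"Between {price_terms[lower_bound]} and {price_terms[upper_bound]}"
--     return "Invalid Activity Cost Value"
-- ===== SOURCE B (Python) =====
-- import bisect
--
--
-- def get_price_term(price_terms, price):
--     keys = sorted(price_terms.keys())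
--     if len(keys) < 2 or price < keys[0] or price > keys[-1]:
--         return "Invalid Activity Cost Value"
--     i = max(bisect.bisect_left(keys, price) - 1, 0)
--     return f"Between {price_terms[keys[i]]} and {price_terms[keys[i + 1]]}"
-- ===== Notes on version B (the rewrite author's own statement) =====
-- stated objective: idiomatic
-- what changed: Replaces the linear first-match scan over consecutive sorted-key pairs with range guards plus bisect.bisect_left, which locates the containing interval directly by binary search.
import Mathlib
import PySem

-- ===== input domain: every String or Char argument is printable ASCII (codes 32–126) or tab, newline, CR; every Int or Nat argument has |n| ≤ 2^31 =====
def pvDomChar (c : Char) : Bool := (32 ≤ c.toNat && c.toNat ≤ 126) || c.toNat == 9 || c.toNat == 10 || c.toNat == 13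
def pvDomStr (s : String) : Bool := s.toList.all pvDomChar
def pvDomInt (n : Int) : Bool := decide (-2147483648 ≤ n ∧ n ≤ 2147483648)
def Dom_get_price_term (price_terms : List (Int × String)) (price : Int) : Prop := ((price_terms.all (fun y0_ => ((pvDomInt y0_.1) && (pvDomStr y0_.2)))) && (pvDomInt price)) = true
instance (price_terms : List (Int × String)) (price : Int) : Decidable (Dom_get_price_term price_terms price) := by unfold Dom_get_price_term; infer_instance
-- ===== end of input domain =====

-- B replaces A's linear consecutive-pair scan with range guards plus bisect.bisect_left,
-- an idiomatic binary-search interval lookup over the same sorted key array.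

-- ===== PORT A =====
-- the for-i-in-range loop with early return, over the remaining index list
def goA (d : PySem.Dict Int String) (price : Int) (ks : List Int) : List Int → String
  | [] => "Invalid Activity Cost Value"
  | i :: rest =>
    let lower_bound := PySem.List.pyGetD ks i 0
    let upper_bound := PySem.List.pyGetD ks (i + 1) 0
    if lower_bound ≤ price ∧ price ≤ upper_bound then
      "Between " ++ d.getD lower_bound "" ++ " and " ++ d.getD upper_bound ""
    else goA d price ks rest

def get_price_term (price_terms : List (Int × String)) (price : Int) : String :=
  let d := PySem.Dict.mk price_terms
  let sorted_terms := PySem.List.sorted d.keys (fun x => x) false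
  goA d price sorted_terms (PySem.List.pyRange 0 ((sorted_terms.length : Int) - 1) 1)

-- ===== PORT B =====
-- bisect.bisect_left from the standard library, ported as its reference loop
def bsearch (ks : List Int) (price : Int) (lo hi : Int) : Int :=
  if lo < hi then
    let mid := PySem.Int.floordiv (lo + hi) 2
    if PySem.List.pyGetD ks mid 0 < price then bsearch ks price (mid + 1) hi
    else bsearch ks price lo mid
  else lo
termination_by (hi - lo).toNat
decreasing_by
  · have h1 : lo ≤ PySem.Int.floordiv (lo + hi) 2 := by
      rw [PySem.Int.le_floordiv_iff_mul_le (by omega)]; omega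
    omega
  · have h2 : PySem.Int.floordiv (lo + hi) 2 < hi := by
      rw [PySem.Int.floordiv_lt_iff_lt_mul (by omega)]; omega
    omega

def get_price_term_alt (price_terms : List (Int × String)) (price : Int) : String :=
  let d := PySem.Dict.mk price_terms
  let keys := PySem.List.sorted d.keys (fun x => x) false
  if keys.length < 2 ∨ price < PySem.List.pyGetD keys 0 0 ∨
      PySem.List.pyGetD keys (-1) 0 < price then
    "Invalid Activity Cost Value"
  else
    let i := max (bsearch keys price 0 (keys.length : Int) - 1) 0
    "Between " ++ d.getD (PySem.List.pyGetD keys i 0) "" ++ " and " ++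
      d.getD (PySem.List.pyGetD keys (i + 1) 0) ""

-- ===== PRECONDITION & SPEC =====
def Spec_get_price_term (price_terms : List (Int × String)) (price : Int) (out : String) : Prop := out = get_price_term_alt price_terms price
instance (price_terms : List (Int × String)) (price : Int) (out : String) : Decidable (Spec_get_price_term price_terms price out) := by unfold Spec_get_price_term; infer_instance

-- ===== CLAIM (what is proved, stated in full; the proofs are below) =====
def Claim_equal_get_price_term : Prop := ∀ (price_terms : List (Int × String)) (price : Int), Dom_get_price_term price_terms price → Spec_get_price_term price_terms price (get_price_term price_terms price)

-- ===== LEMMAS AND PROOFS =====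

-- monotone indexed access on a (≤)-sorted list
theorem pyGetD_mono_of_pairwise_le (ks : List Int) (h : ks.Pairwise (· ≤ ·))
    (p q : Int) (hp : 0 ≤ p) (hpq : p ≤ q) (hq : q < (ks.length : Int)) :
    PySem.List.pyGetD ks p 0 ≤ PySem.List.pyGetD ks q 0 := by
  rw [PySem.List.pyGetD_eq_getElem ks 0 hp (by omega),
      PySem.List.pyGetD_eq_getElem ks 0 (by omega) hq]
  rcases Nat.lt_or_ge p.toNat q.toNat with hlt | hge
  · exact (List.pairwise_iff_getElem.mp h) p.toNat q.toNat (by omega) (by omega) hlt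
  · have hpq' : p.toNat = q.toNat := by omega
    simp [hpq']

-- the binary search returns the bisect_left index: everything before it is < price,
-- everything from it on is ≥ price
theorem bsearch_spec (ks : List Int) (price : Int)
    (hmono : ∀ p q : Int, 0 ≤ p → p ≤ q → q < (ks.length : Int) →
      PySem.List.pyGetD ks p 0 ≤ PySem.List.pyGetD ks q 0) :
    ∀ (fuel : Nat) (lo hi : Int), (hi - lo).toNat ≤ fuel →
    0 ≤ lo → lo ≤ hi → hi ≤ (ks.length : Int) →
    (∀ j, 0 ≤ j → j < lo → PySem.List.pyGetD ks j 0 < price) →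
    (∀ j, hi ≤ j → j < (ks.length : Int) → price ≤ PySem.List.pyGetD ks j 0) →
    lo ≤ bsearch ks price lo hi ∧ bsearch ks price lo hi ≤ hi ∧
    (∀ j, 0 ≤ j → j < bsearch ks price lo hi → PySem.List.pyGetD ks j 0 < price) ∧
    (∀ j, bsearch ks price lo hi ≤ j → j < (ks.length : Int) →
      price ≤ PySem.List.pyGetD ks j 0) := by
  intro fuel
  induction fuel with
  | zero =>
    intro lo hi hfuel h0 hlh hhn hbelow habove
    rw [bsearch, if_neg (by omega)]
    exact ⟨le_refl _, by omega, hbelow, fun j hj hjn => habove j (by omega) hjn⟩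
  | succ k ih =>
    intro lo hi hfuel h0 hlh hhn hbelow habove
    by_cases hlt : lo < hi
    · have hmidlo : lo ≤ PySem.Int.floordiv (lo + hi) 2 := by
        rw [PySem.Int.le_floordiv_iff_mul_le (by omega)]; omega
      have hmidhi : PySem.Int.floordiv (lo + hi) 2 < hi := by
        rw [PySem.Int.floordiv_lt_iff_lt_mul (by omega)]; omega
      rw [bsearch, if_pos hlt]
      set mid := PySem.Int.floordiv (lo + hi) 2 with hmid
      by_cases hc : PySem.List.pyGetD ks mid 0 < price
      · rw [if_pos hc]
        exact And.imp (fun h => by omega) id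
          (ih (mid + 1) hi (by omega) (by omega) (by omega) hhn
            (fun j hj hjm =>
              lt_of_le_of_lt (hmono j mid hj (by omega) (by omega)) hc)
            habove)
      · rw [if_neg hc]
        refine And.imp id (And.imp (fun h => by omega) id)
          (ih lo mid (by omega) h0 (by omega) (by omega) hbelow ?_)
        intro j hj hjn
        exact le_trans (le_of_not_gt hc) (hmono mid j (by omega) hj hjn)
    · rw [bsearch, if_neg hlt]
      exact ⟨le_refl _, by omega, hbelow, fun j hj hjn => habove j (by omega) hjn⟩

-- A's scan over an index range with no matching pair returns the sentinel
theorem goA_none (d : PySem.Dict Int String) (price : Int) (ks : List Int) (b : Int) :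
    ∀ (fuel : Nat) (a : Int), (b - a).toNat ≤ fuel →
    (∀ j, a ≤ j → j < b →
      ¬ (PySem.List.pyGetD ks j 0 ≤ price ∧ price ≤ PySem.List.pyGetD ks (j + 1) 0)) →
    goA d price ks (PySem.List.pyRange a b 1) = "Invalid Activity Cost Value" := by
  intro fuel
  induction fuel with
  | zero =>
    intro a hfuel _
    rw [PySem.List.pyRange_one_eq_nil (by omega)]
    rfl
  | succ k ih =>
    intro a hfuel hnm
    by_cases hab : a < b
    · rw [PySem.List.pyRange_one_cons hab, goA,
        if_neg (hnm a (le_refl a) hab)]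
      exact ih (a + 1) (by omega) (fun j hj hjb => hnm j (by omega) hjb)
    · rw [PySem.List.pyRange_one_eq_nil (by omega)]
      rfl

-- A's scan returns the pair at the FIRST matching index i
theorem goA_finds (d : PySem.Dict Int String) (price : Int) (ks : List Int)
    (b i : Int) (hib : i < b)
    (hM : PySem.List.pyGetD ks i 0 ≤ price ∧ price ≤ PySem.List.pyGetD ks (i + 1) 0) :
    ∀ (fuel : Nat) (a : Int), (i - a).toNat ≤ fuel → a ≤ i →
    (∀ j, a ≤ j → j < i →
      ¬ (PySem.List.pyGetD ks j 0 ≤ price ∧ price ≤ PySem.List.pyGetD ks (j + 1) 0)) →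
    goA d price ks (PySem.List.pyRange a b 1) =
      "Between " ++ d.getD (PySem.List.pyGetD ks i 0) "" ++ " and " ++
        d.getD (PySem.List.pyGetD ks (i + 1) 0) "" := by
  intro fuel
  induction fuel with
  | zero =>
    intro a hfuel hai _
    have hae : a = i := by omega
    subst hae
    rw [PySem.List.pyRange_one_cons hib, goA, if_pos hM]
  | succ k ih =>
    intro a hfuel hai hnm
    by_cases hae : a = i
    · subst hae
      rw [PySem.List.pyRange_one_cons hib, goA, if_pos hM]
    · rw [PySem.List.pyRange_one_cons (by omega), goA,
        if_neg (hnm a (le_refl a) (by omega))]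
      exact ih (a + 1) (by omega) (by omega) (fun j hj hji => hnm j (by omega) hji)

theorem get_price_term_spec : Claim_equal_get_price_term := by
  intro price_terms price _
  show get_price_term price_terms price = get_price_term_alt price_terms price
  simp only [get_price_term, get_price_term_alt]
  set d := PySem.Dict.mk price_terms with hd
  set ks := PySem.List.sorted d.keys (fun x => x) false with hks
  set n : Int := (ks.length : Int) with hn
  have hle : ks.Pairwise (· ≤ ·) := by
    have h := PySem.List.sorted_pairwise d.keys (fun x => x)
    simpa [hks] using h
  have hmono := pyGetD_mono_of_pairwise_le ks hle
  by_cases hsmall : ks.length < 2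
  · rw [if_pos (Or.inl hsmall),
      goA_none d price ks (n - 1) (n - 1 - 0).toNat 0 (le_refl _)
        (fun j hj hjb => absurd hjb (by omega))]
  · push Not at hsmall
    have hne : ks ≠ [] := by
      intro h; rw [h] at hsmall; simp at hsmall
    have hlastD : PySem.List.pyGetD ks (n - 1) 0 = PySem.List.pyGetD ks (-1) 0 := by
      rw [PySem.List.pyGetD_eq_getElem ks 0 (by omega) (by omega),
        PySem.List.pyGetD_neg_one ks 0 hne, List.getLast_eq_getElem]
      congr 1
      omega
    by_cases hlo : price < PySem.List.pyGetD ks 0 0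
    · -- below the minimum: every lower bound is too big
      rw [if_pos (Or.inr (Or.inl hlo)),
        goA_none d price ks (n - 1) (n - 1 - 0).toNat 0 (le_refl _) ?_]
      intro j hj hjb hMj
      exact absurd (le_trans (hmono 0 j (le_refl 0) hj (by omega)) hMj.1)
        (not_le.mpr hlo)
    · by_cases hhi : PySem.List.pyGetD ks (-1) 0 < price
      · -- above the maximum: every upper bound is too small
        rw [if_pos (Or.inr (Or.inr hhi)),
          goA_none d price ks (n - 1) (n - 1 - 0).toNat 0 (le_refl _) ?_]
        intro j hj hjb hMj
        have hup : PySem.List.pyGetD ks (j + 1) 0 ≤ PySem.List.pyGetD ks (n - 1) 0 :=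
          hmono (j + 1) (n - 1) (by omega) (by omega) (by omega)
        rw [hlastD] at hup
        exact absurd (le_trans hMj.2 hup) (not_le.mpr hhi)
      · -- in range: the binary search finds the interval
        rw [if_neg (by push Not; exact ⟨by omega, le_of_not_gt hlo, le_of_not_gt hhi⟩)]
        obtain ⟨hL0, hLn, hLb, hLa⟩ :=
          bsearch_spec ks price hmono (n - 0).toNat 0 n (le_refl _)
            (le_refl 0) (by omega) (le_refl n)
            (fun j hj hjl => absurd hjl (by omega))
            (fun j hj hjn => absurd hjn (by omega))
        set L := bsearch ks price 0 n with hL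
        have hLlt : L < n := by
          by_contra hc
          push Not at hc
          have hbad := hLb (n - 1) (by omega) (by omega)
          rw [hlastD] at hbad
          exact hhi hbad
        by_cases hLpos : 0 < L
        · have hmaxeq : max (L - 1) 0 = L - 1 := by omega
          rw [hmaxeq]
          apply goA_finds d price ks (n - 1) (L - 1) (by omega)
            ⟨le_of_lt (hLb (L - 1) (by omega) (by omega)), by
              have hstep : L - 1 + 1 = L := by omega
              rw [hstep]
              exact hLa L (le_refl L) hLlt⟩
            (L - 1 - 0).toNat 0 (le_refl _) (by omega)
          intro j hj hji hMj
          exact absurd hMj.2 (not_le.mpr (hLb (j + 1) (by omega) (by omega)))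
        · have hmaxeq : max (L - 1) 0 = 0 := by omega
          rw [hmaxeq]
          apply goA_finds d price ks (n - 1) 0 (by omega)
            ⟨le_of_not_gt hlo, by
              have h1 := hLa 1 (by omega) (by omega)
              simpa using h1⟩
            0 0 (le_refl _) (le_refl 0)
          intro j hj hji hMj
          omega
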